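-- pv_equiv track=rewrite | github.com/lvyunlv/LVT | tiny_table.py | split_x
-- ===== SOURCE A (Python) =====
-- def split_x(x, delta_bits, sub_bits_list):
--     indices = []
--     shift = delta_bits
--     for bits in sub_bits_list:
--         shift -= bits
--         mask = (1 << bits) - 1
--         indices.append((x >> shift) & mask)
--     return indices
-- ===== SOURCE B (Python) =====
-- def split_x(x, delta_bits, sub_bits_list):
--     # Read the fields as digits of a mixed-radix number: drop the leftover low
--     # bits once, then peel one base-2**bits digit per field with divmod,
--     # LSB-first, and reverse at the end.
--     if not sub_bits_list:
--         return []
--     y = x // (1 << (delta_bits - sum(sub_bits_list)))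
--     fields = []
--     for bits in reversed(sub_bits_list):
--         y, r = divmod(y, 1 << bits)
--         fields.append(r)
--     return fields[::-1]
-- ===== Notes on version B (the rewrite author's own statement) =====
-- stated objective: alternative
-- what changed: B treats the fields as mixed-radix digits: one pre-division drops the leftover low bits, then each field is peeled LSB-first with divmod by 2**bits and the digit list is reversed, replacing A's top-down loop that masks at a freshly computed absolute shift per field.
import Mathlib
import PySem

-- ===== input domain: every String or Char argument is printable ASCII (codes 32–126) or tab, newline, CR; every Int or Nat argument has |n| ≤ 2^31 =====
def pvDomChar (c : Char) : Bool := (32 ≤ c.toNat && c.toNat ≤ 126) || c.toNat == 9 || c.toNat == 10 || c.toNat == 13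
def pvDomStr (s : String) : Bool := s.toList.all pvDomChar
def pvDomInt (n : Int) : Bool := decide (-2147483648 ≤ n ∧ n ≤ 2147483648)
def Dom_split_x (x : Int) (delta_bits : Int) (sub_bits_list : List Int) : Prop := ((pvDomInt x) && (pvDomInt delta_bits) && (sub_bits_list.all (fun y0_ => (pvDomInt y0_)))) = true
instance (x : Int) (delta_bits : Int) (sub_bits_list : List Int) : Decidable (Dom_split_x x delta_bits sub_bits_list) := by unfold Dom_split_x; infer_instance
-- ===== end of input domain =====

-- B reads the fields as mixed-radix digits: it drops the leftover low bits once and then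
-- peels one base-2^bits digit per field with divmod, LSB-first, reversing at the end —
-- division arithmetic instead of A's per-field absolute shift-and-mask (objective: alternative, same cost).

-- ===== PORT A =====
-- Python '&' on ints is PySem.Int.band; '1 << bits' is '(1:Int) <<< bits.toNat' and
-- 'x >> shift' is 'x >>> shift.toNat' (exact for nonnegative counts, guaranteed by Pre_;
-- Python raises ValueError on a negative shift count, which Pre_ excludes).
def split_x (x : Int) (delta_bits : Int) (sub_bits_list : List Int) : List Int :=
  (sub_bits_list.foldl
    (fun (st : List Int × Int) bits =>
      let shift := st.2 - bits
      let mask := ((1:Int) <<< bits.toNat) - 1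
      (st.1 ++ [PySem.Int.band (x >>> shift.toNat) mask], shift))
    ([], delta_bits)).1

-- ===== PORT B =====
-- the loop 'y, r = divmod(y, 1 << bits); fields.append(r)' over reversed(sub_bits_list),
-- as the obvious structural recursion (divisor 2^bits is never 0, so the none branch of
-- divmod? is unreachable).
def bDigits : Int → List Int → List Int
  | _, [] => []
  | y, bits :: rest =>
      match PySem.Int.divmod? y ((1:Int) <<< bits.toNat) with
      | some (q, r) => r :: bDigits q rest
      | none => []

def split_x_alt (x : Int) (delta_bits : Int) (sub_bits_list : List Int) : List Int :=
  if sub_bits_list = [] then []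
  else
    (bDigits (PySem.Int.floordiv x ((1:Int) <<< (delta_bits - sub_bits_list.sum).toNat))
      sub_bits_list.reverse).reverse

-- ===== PRECONDITION & SPEC =====
-- Pre_ excludes exactly the inputs where Python A raises ValueError: a negative bit width
-- (1 << bits raises) or, for a nonempty list, a total width exceeding delta_bits (x >> shift
-- with a negative shift raises).
def Pre_split_x (x : Int) (delta_bits : Int) (sub_bits_list : List Int) : Prop :=
  (∀ b ∈ sub_bits_list, 0 ≤ b) ∧ (sub_bits_list ≠ [] → sub_bits_list.sum ≤ delta_bits)
instance (x : Int) (delta_bits : Int) (sub_bits_list : List Int) : Decidable (Pre_split_x x delta_bits sub_bits_list) := by unfold Pre_split_x; infer_instance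
def pvWitness_split_x : Int × Int × List Int := (437, 10, [2, 3, 4])

def Spec_split_x (x : Int) (delta_bits : Int) (sub_bits_list : List Int) (out : List Int) : Prop := out = split_x_alt x delta_bits sub_bits_list
instance (x : Int) (delta_bits : Int) (sub_bits_list : List Int) (out : List Int) : Decidable (Spec_split_x x delta_bits sub_bits_list out) := by unfold Spec_split_x; infer_instance

-- ===== CLAIM (what is proved, stated in full; the proofs are below) =====
def Claim_equal_split_x : Prop := ∀ (x : Int) (delta_bits : Int) (sub_bits_list : List Int), Dom_split_x x delta_bits sub_bits_list → Pre_split_x x delta_bits sub_bits_list → Spec_split_x x delta_bits sub_bits_list (split_x x delta_bits sub_bits_list)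

-- ===== LEMMAS AND PROOFS =====

-- (1:Int) <<< b is 2^b.
theorem one_shl (b : Nat) : (1:Int) <<< b = 2^b := by simp [Int.shiftLeft_eq]

-- Python '//' by 2^b is '>>' by b (both floor).
theorem floordiv_pow_shr (y : Int) (b : Nat) :
    PySem.Int.floordiv y ((1:Int) <<< b) = y >>> b := by
  rw [PySem.Int.floordiv, Int.shiftRight_eq_div_pow, Int.fdiv_eq_ediv]
  norm_num [Int.shiftLeft_eq]

-- Python '% (1 << b)' is '& ((1 << b) - 1)', for every integer y (two's-complement).
theorem mod_pow_band (y : Int) (b : Nat) :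
    PySem.Int.mod y ((1:Int) <<< b) = PySem.Int.band y (((1:Int) <<< b) - 1) := by
  have hm : (1:Int) <<< b = 2^b := one_shl b
  have hcast : ((2^b : Nat) : Int) = 2^b := by push_cast; ring
  have hpos : 0 < 2^b := Nat.two_pow_pos b
  have hMt : ((2:Int)^b - 1).toNat = 2^b - 1 := by omega
  have hfm : y.fmod (2^b) = y % (2^b) := by
    rw [Int.fmod_eq_emod]; simp [show (0:Int) ≤ 2^b by positivity]
  rw [PySem.Int.mod, PySem.Int.band, hm, hfm]
  rcases (by omega : 0 ≤ y ∨ y < 0) with hy | hy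
  · rw [if_pos hy, if_pos (by omega : (0:Int) ≤ 2^b - 1), hMt]
    rw [Nat.and_two_pow_sub_one_eq_mod]
    have hy' : y = ((y.toNat : Nat) : Int) := by omega
    rw [hy', ← hcast, Int.natCast_emod]
    simp
  · rw [if_neg (by omega), if_pos (by omega : (0:Int) ≤ 2^b - 1), hMt]
    set k := (-y - 1).toNat with hk
    have hyk : y = -(k:Int) - 1 := by omega
    rw [Nat.and_comm, Nat.and_two_pow_sub_one_eq_mod]
    set e := k % 2^b with he
    have helt : e < 2^b := Nat.mod_lt _ hpos
    obtain ⟨q, hq⟩ : ∃ q, k = q * 2^b + e := ⟨k / 2^b, by rw [he]; exact (Nat.div_add_mod' k (2^b)).symm⟩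
    have hsplit : y = ((2^b:Int) - 1 - e) + (-(q:Int)-1) * 2^b := by
      rw [hyk, hq]; push_cast; ring
    rw [hsplit, Int.add_mul_emod_self_right, Int.emod_eq_of_lt (by omega) (by omega)]
    push_cast [Nat.cast_sub (by omega : e ≤ 2^b - 1), Nat.cast_sub (by omega : 1 ≤ 2^b)]
    ring

-- divmod? by the nonzero divisor 2^b, componentwise.
theorem divmod_pow (y : Int) (b : Nat) :
    PySem.Int.divmod? y ((1:Int) <<< b) =
      some (PySem.Int.floordiv y ((1:Int) <<< b), PySem.Int.mod y ((1:Int) <<< b)) := by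
  have h : (1:Int) <<< b ≠ 0 := by rw [one_shl]; positivity
  rw [PySem.Int.divmod?, if_neg h]; rfl

theorem shr_shr (x : Int) {a b : Int} (ha : 0 ≤ a) (hb : 0 ≤ b) :
    (x >>> a.toNat) >>> b.toNat = x >>> (a + b).toNat := by
  rw [← Int.shiftRight_add]
  congr 1
  omega

-- A's output, written as a structural recursion on the field list (shift carried top-down).
def fieldsA (x : Int) : Int → List Int → List Int
  | _, [] => []
  | shift, b :: t =>
      (PySem.Int.band (x >>> (shift - b).toNat) (((1:Int) <<< b.toNat) - 1)) :: fieldsA x (shift - b) t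

theorem splitA_foldl (x : Int) (l : List Int) :
    ∀ (acc : List Int) (shift : Int),
      (l.foldl (fun (st : List Int × Int) bits =>
          (st.1 ++ [PySem.Int.band (x >>> (st.2 - bits).toNat) (((1:Int) <<< bits.toNat) - 1)], st.2 - bits))
        (acc, shift)).1 = acc ++ fieldsA x shift l := by
  induction l with
  | nil => simp [fieldsA]
  | cons b t ih =>
      intro acc shift
      simp only [List.foldl_cons, fieldsA, ih]
      simp

theorem split_x_eq_fieldsA (x d : Int) (l : List Int) :
    split_x x d l = fieldsA x d l := by
  simpa [split_x] using splitA_foldl x l [] d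

theorem fieldsA_append (x : Int) (l : List Int) (b : Int) :
    ∀ (s : Int),
      fieldsA x s (l ++ [b]) =
        fieldsA x s l ++ [PySem.Int.band (x >>> (s - l.sum - b).toNat) (((1:Int) <<< b.toNat) - 1)] := by
  induction l with
  | nil => intro s; simp [fieldsA]
  | cons b' t ih =>
      intro s
      simp only [List.cons_append, fieldsA, ih, List.sum_cons]
      have h : s - b' - t.sum - b = s - (b' + t.sum) - b := by ring
      rw [h]

-- B's digit loop, rewritten in shift-and-mask form via mod_pow_band/floordiv_pow_shr.
def revFields : Int → List Int → List Int
  | _, [] => []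
  | y, b :: t => (PySem.Int.band y (((1:Int) <<< b.toNat) - 1)) :: revFields (y >>> b.toNat) t

theorem bDigits_eq_revFields (l : List Int) : ∀ (y : Int), bDigits y l = revFields y l := by
  induction l with
  | nil => intro y; rfl
  | cons b t ih =>
      intro y
      rw [bDigits, divmod_pow]
      dsimp only
      rw [revFields, floordiv_pow_shr, mod_pow_band, ih]

theorem revFields_reverse (x : Int) (l : List Int) (hpos : ∀ b ∈ l, 0 ≤ b) :
    ∀ (s : Int), 0 ≤ s →
      (revFields (x >>> s.toNat) l.reverse).reverse = fieldsA x (s + l.sum) l := by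
  induction l using List.reverseRecOn with
  | nil => intro s _; simp [revFields, fieldsA]
  | append_singleton l b ih =>
      intro s hs
      have hb : 0 ≤ b := hpos b (by simp)
      have hpos' : ∀ b' ∈ l, 0 ≤ b' := fun b' hb' => hpos b' (by simp [hb'])
      rw [List.reverse_append]
      simp only [List.reverse_cons, List.reverse_nil, List.nil_append, List.singleton_append,
        revFields, List.reverse_cons]
      rw [shr_shr x hs hb, ih hpos' (s + b) (by omega)]
      rw [fieldsA_append]
      have h1 : (s + (l ++ [b]).sum) - l.sum - b = s := by
        simp [List.sum_append]; ring
      have h2 : s + b + l.sum = s + (l ++ [b]).sum := by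
        simp [List.sum_append]; ring
      rw [h1, h2]

-- ===== VERDICT (by name: the statement is the Claim_ definition above) =====
theorem split_x_spec : Claim_equal_split_x := by
  intro x d l _ hpre
  unfold Spec_split_x
  rcases hpre with ⟨hpos, hsum⟩
  rcases eq_or_ne l [] with rfl | hne
  · simp [split_x, split_x_alt]
  · have hle : l.sum ≤ d := hsum hne
    unfold split_x_alt
    rw [if_neg hne]
    rw [bDigits_eq_revFields, floordiv_pow_shr]
    rw [revFields_reverse x l hpos (d - l.sum) (by omega)]
    rw [split_x_eq_fieldsA]
    congr 1
    ring
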